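-- pv_equiv track=rewrite | github.com/khalidkhaan/n-queen-visualize | streamlit_app.py | find_clashing_pairs
-- ===== SOURCE A (Python) =====
-- def find_clashing_pairs(chromosome):
--     clashes = []
--     for i in range(len(chromosome)):
--         for j in range(i + 1, len(chromosome)):
--             row1, col1 = chromosome[i], i
--             row2, col2 = chromosome[j], j
--             if row1 == row2 or abs(row1 - row2) == abs(col1 - col2):
--                 clashes.append(((row1, col1), (row2, col2)))
--     return clashes
-- ===== SOURCE B (Python) =====
-- def find_clashing_pairs(chromosome):
--     cells = [(r, i) for i, r in enumerate(chromosome)]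
--     # group queen columns by row, diagonal and anti-diagonal
--     rows = {}
--     diags = {}
--     antis = {}
--     for i, r in enumerate(chromosome):
--         rows.setdefault(r, []).append(i)
--         diags.setdefault(r - i, []).append(i)
--         antis.setdefault(r + i, []).append(i)
--     # partners[i] = columns j > i clashing with i; two queens clash iff they
--     # share a group, and a pair can share at most one group, so no duplicates
--     partners = {}
--     for groups in (rows, diags, antis):
--         for lst in groups.values():
--             for a, i in enumerate(lst):
--                 partners.setdefault(i, []).extend(lst[a + 1:])
--     out = []
--     for i in range(len(chromosome)):
--         ps = partners.get(i)
--         if ps: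
--             ps.sort()
--             ci = cells[i]
--             out += [(ci, cells[j]) for j in ps]
--     return out
-- ===== Notes on version B (the rewrite author's own statement) =====
-- stated objective: faster
-- what changed: replaces A's all-pairs double scan by hashing queens into row/diagonal/anti-diagonal groups (the three clash reasons are mutually exclusive), emitting pairs within each group and sorting them by (col1, col2)
import Mathlib
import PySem

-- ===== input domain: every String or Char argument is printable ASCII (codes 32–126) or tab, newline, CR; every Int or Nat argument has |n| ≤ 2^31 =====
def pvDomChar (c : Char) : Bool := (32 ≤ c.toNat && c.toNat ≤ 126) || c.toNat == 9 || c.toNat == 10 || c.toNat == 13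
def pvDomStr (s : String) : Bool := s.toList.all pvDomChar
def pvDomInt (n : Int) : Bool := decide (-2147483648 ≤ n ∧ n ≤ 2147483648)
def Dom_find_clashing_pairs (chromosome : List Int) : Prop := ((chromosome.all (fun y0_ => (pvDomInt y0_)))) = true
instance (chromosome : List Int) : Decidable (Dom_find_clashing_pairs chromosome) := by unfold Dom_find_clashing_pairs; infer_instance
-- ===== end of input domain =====

-- B replaces A's all-pairs double scan by grouping queen columns under row/diagonal/
-- anti-diagonal keys and emitting, per column, its sorted clashing successors (objective: faster).

-- ===== PORT A =====
def find_clashing_pairs (chromosome : List Int) : List ((Int × Int) × (Int × Int)) :=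
  (PySem.List.pyRange 0 (chromosome.length : Int)).foldl (fun clashes i =>
    (PySem.List.pyRange (i + 1) (chromosome.length : Int)).foldl (fun clashes j =>
      let row1 := PySem.List.pyGetD chromosome i 0
      let col1 := i
      let row2 := PySem.List.pyGetD chromosome j 0
      let col2 := j
      if row1 == row2 || (row1 - row2).natAbs == (col1 - col2).natAbs then
        clashes ++ [((row1, col1), (row2, col2))]
      else clashes) clashes) []

-- ===== PORT B =====
def find_clashing_pairs_alt (chromosome : List Int) : List ((Int × Int) × (Int × Int)) :=
  let cells := (PySem.List.enumerate chromosome).map (fun e => (e.2, e.1))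
  -- one loop filling the three group dicts (rows, diags, antis)
  let gs := (PySem.List.enumerate chromosome).foldl
    (fun (g : PySem.Dict Int (List Int) × PySem.Dict Int (List Int) × PySem.Dict Int (List Int)) e =>
      (g.1.modify e.2 ([] : List Int) (fun l => l ++ [e.1]),
       g.2.1.modify (e.2 - e.1) ([] : List Int) (fun l => l ++ [e.1]),
       g.2.2.modify (e.2 + e.1) ([] : List Int) (fun l => l ++ [e.1])))
    (PySem.Dict.empty, PySem.Dict.empty, PySem.Dict.empty)
  -- partners[i] extended by lst[a+1:] for each group list lst with lst[a] = i
  let partners := [gs.1, gs.2.1, gs.2.2].foldl (fun p g =>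
      g.values.foldl (fun p lst =>
        (PySem.List.enumerate lst).foldl
          (fun p e => p.modify e.2 ([] : List Int)
            (fun l => l ++ PySem.List.slice lst (some (e.1 + 1)))) p) p)
    PySem.Dict.empty
  -- emit, per column i in order, its sorted partners (skipping columns with none)
  (PySem.List.pyRange 0 (chromosome.length : Int)).foldl (fun out i =>
    match partners.get? i with
    | none => out
    | some ps =>
      if ps.isEmpty then out
      else
        let ci := PySem.List.pyGetD cells i (0, 0)
        out ++ (PySem.List.sorted ps (fun x => x)).map
          (fun j => (ci, PySem.List.pyGetD cells j (0, 0)))) []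

-- ===== PRECONDITION & SPEC =====
def Spec_find_clashing_pairs (chromosome : List Int) (out : List ((Int × Int) × (Int × Int))) : Prop := out = find_clashing_pairs_alt chromosome
instance (chromosome : List Int) (out : List ((Int × Int) × (Int × Int))) : Decidable (Spec_find_clashing_pairs chromosome out) := by unfold Spec_find_clashing_pairs; infer_instance

-- ===== CLAIM (what is proved, stated in full; the proofs are below) =====
def Claim_equal_find_clashing_pairs : Prop := ∀ (chromosome : List Int), Dom_find_clashing_pairs chromosome → Spec_find_clashing_pairs chromosome (find_clashing_pairs chromosome)

-- ===== LEMMAS AND PROOFS =====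

-- the clash test of A, as a Bool on two column indices
def pvClashB (c : List Int) (i j : Int) : Bool :=
  PySem.List.pyGetD c i 0 == PySem.List.pyGetD c j 0 ||
  (PySem.List.pyGetD c i 0 - PySem.List.pyGetD c j 0).natAbs == (i - j).natAbs

-- A's output in flatMap/filter/map normal form
def pvCanon (c : List Int) : List ((Int × Int) × (Int × Int)) :=
  (PySem.List.pyRange 0 (c.length : Int)).flatMap (fun i =>
    ((PySem.List.pyRange (i + 1) (c.length : Int)).filter (fun j => pvClashB c i j)).map
      (fun j => ((PySem.List.pyGetD c i 0, i), (PySem.List.pyGetD c j 0, j))))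

def pvCellsList (c : List Int) : List (Int × Int) :=
  (PySem.List.enumerate c).map (fun e => (e.2, e.1))

-- one group dict, parametrised by the key function (row / diag / anti-diag)
def pvGrp (c : List Int) (kf : Int × Int → Int) : PySem.Dict Int (List Int) :=
  (PySem.List.enumerate c).foldl (fun d e => d.modify (kf e) ([] : List Int) (fun l => l ++ [e.1]))
    PySem.Dict.empty

def pvColsOf (c : List Int) (kf : Int × Int → Int) (v : Int) : List Int :=
  ((PySem.List.enumerate c).filter (fun e => kf e == v)).map (fun e => e.1)

def pvKF1 : Int × Int → Int := fun e => e.2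
def pvKF2 : Int × Int → Int := fun e => e.2 - e.1
def pvKF3 : Int × Int → Int := fun e => e.2 + e.1

def pvLists (c : List Int) : List (List Int) :=
  (pvGrp c pvKF1).values ++ (pvGrp c pvKF2).values ++ (pvGrp c pvKF3).values

-- recursion model of the partner-filling loop over one group list
def pwGo : List Int → PySem.Dict Int (List Int) → PySem.Dict Int (List Int)
  | [], p => p
  | x :: t, p => pwGo t (p.modify x ([] : List Int) (fun l => l ++ t))

def pvPartners (c : List Int) : PySem.Dict Int (List Int) :=
  (pvLists c).foldl (fun p lst => pwGo lst p) PySem.Dict.empty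

-- does column i (with row r_i) fall in the kf-group of value v?
def pvRel (c : List Int) (i j : Int) : Prop :=
  PySem.List.pyGetD c i 0 = PySem.List.pyGetD c j 0 ∨
  PySem.List.pyGetD c i 0 - i = PySem.List.pyGetD c j 0 - j ∨
  PySem.List.pyGetD c i 0 + i = PySem.List.pyGetD c j 0 + j

lemma pvA_eq_canon (c : List Int) : find_clashing_pairs c = pvCanon c := by
  unfold find_clashing_pairs pvCanon
  refine Eq.trans (PySem.List.foldl_congr_mem _ _
    (fun acc i => acc ++ (((PySem.List.pyRange (i + 1) (c.length : Int)).filter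
      (fun j => pvClashB c i j)).map
      (fun j => ((PySem.List.pyGetD c i 0, i), (PySem.List.pyGetD c j 0, j))))) _
    (fun acc i _ => PySem.List.foldl_append_if (fun j => pvClashB c i j) _ _ _)) ?_
  rw [PySem.List.foldl_append_eq_flatMap]
  simp

lemma pyRange_pairwise (a b : Int) : (PySem.List.pyRange a b).Pairwise (· < ·) := by
  generalize hf : (b - a).toNat = fuel
  induction fuel generalizing a with
  | zero =>
    have : PySem.List.pyRange a b = [] :=
      List.eq_nil_iff_forall_not_mem.mpr (fun x hx => by
        rw [PySem.List.mem_pyRange_one] at hx; omega)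
    rw [this]; exact List.Pairwise.nil
  | succ m ih =>
    rcases lt_or_ge a b with hab | hab
    · rw [PySem.List.pyRange_one_cons hab]
      refine List.Pairwise.cons ?_ (ih (a + 1) (by omega))
      intro x hx
      rw [PySem.List.mem_pyRange_one] at hx; omega
    · have : PySem.List.pyRange a b = [] :=
        List.eq_nil_iff_forall_not_mem.mpr (fun x hx => by
          rw [PySem.List.mem_pyRange_one] at hx; omega)
      rw [this]; exact List.Pairwise.nil

lemma enumerate_eq (c : List Int) (s : Int) :
    PySem.List.enumerate c s = (List.range c.length).map (fun (t : Nat) => (s + (t : Int), c.getD t 0)) := by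
  induction c generalizing s with
  | nil => simp [PySem.List.enumerate]
  | cons x t ih =>
    show (s, x) :: PySem.List.enumerate t (s + 1) = _
    rw [ih (s + 1)]
    simp only [List.length_cons, List.range_succ_eq_map, List.map_cons, List.map_map]
    refine congrArg₂ _ (by simp) ?_
    apply List.map_congr_left
    intro k _
    simp only [Function.comp_apply, List.getD_cons_succ]
    refine congrArg₂ _ (by push_cast; ring) rfl

lemma mem_enumerate (c : List Int) (i r : Int) :
    (i, r) ∈ PySem.List.enumerate c ↔ 0 ≤ i ∧ i < (c.length : Int) ∧ r = PySem.List.pyGetD c i 0 := by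
  rw [enumerate_eq c 0]
  simp only [List.mem_map, List.mem_range, Prod.mk.injEq]
  constructor
  · rintro ⟨t, ht, h1, h2⟩
    refine ⟨by omega, by omega, ?_⟩
    have : i = (t : Int) := by omega
    rw [this, PySem.List.pyGetD_natCast]
    exact h2.symm
  · rintro ⟨h0, hn, hr⟩
    refine ⟨i.toNat, by omega, by omega, ?_⟩
    rw [PySem.List.pyGetD_of_nonneg c 0 h0] at hr
    exact hr.symm

lemma enumerate_pairwise (c : List Int) :
    (PySem.List.enumerate c).Pairwise (fun e e' : Int × Int => e.1 < e'.1) := by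
  rw [enumerate_eq c 0]
  exact List.Pairwise.map _ (fun a b h => by simpa using h) List.pairwise_lt_range

lemma clash_iff (c : List Int) (i j : Int) (hij : i < j) :
    pvClashB c i j = true ↔ pvRel c i j := by
  simp only [pvClashB, pvRel, Bool.or_eq_true, beq_iff_eq]
  omega

lemma cellsList_get (c : List Int) (i : Int) (h0 : 0 ≤ i) (hn : i < (c.length : Int)) :
    PySem.List.pyGetD (pvCellsList c) i (0, 0) = (PySem.List.pyGetD c i 0, i) := by
  unfold pvCellsList
  rw [enumerate_eq c 0, List.map_map,
    PySem.List.pyGetD_eq_getElem _ _ h0 (by simpa using hn),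
    PySem.List.pyGetD_of_nonneg c 0 h0]
  simp only [List.getElem_map, List.getElem_range, Function.comp_apply]
  refine congrArg₂ _ rfl (by omega)

-- ----- group dicts -----

lemma grp_getD (c : List Int) (kf : Int × Int → Int) (v : Int) :
    (pvGrp c kf).getD v ([] : List Int) = pvColsOf c kf v := by
  unfold pvGrp pvColsOf
  rw [show (List.foldl (fun d e => d.modify (kf e) ([] : List Int) (fun l => l ++ [e.1]))
      PySem.Dict.empty (PySem.List.enumerate c))
      = (List.foldl (fun d p => d.modify p.1 ([] : List Int) (fun l => l ++ [p.2]))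
      PySem.Dict.empty ((PySem.List.enumerate c).map (fun e => (kf e, e.1)))) from by
    rw [List.foldl_map]]
  rw [PySem.Dict.getD_foldl_modify_append, PySem.Dict.getD_empty, List.nil_append]
  rw [List.filter_map, List.map_map]
  rfl

lemma grp_keys_nodup (c : List Int) (kf : Int × Int → Int) : (pvGrp c kf).keys.Nodup :=
  PySem.Dict.nodup_keys_foldl_modify_key (PySem.List.enumerate c) kf ([] : List Int)
    (fun _ e l => l ++ [e.1]) PySem.Dict.empty List.nodup_nil

lemma grp_keys (c : List Int) (kf : Int × Int → Int) :
    (pvGrp c kf).keys = PySem.Set.ofList ((PySem.List.enumerate c).map kf) :=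
  PySem.Dict.keys_foldl_modify_key (PySem.List.enumerate c) kf ([] : List Int)
    (fun _ e l => l ++ [e.1]) PySem.Dict.empty

lemma grp_values (c : List Int) (kf : Int × Int → Int) :
    (pvGrp c kf).values
      = (PySem.Set.ofList ((PySem.List.enumerate c).map kf)).map (pvColsOf c kf) := by
  rw [← grp_keys c kf,
    PySem.Dict.values_eq_map_keys (pvGrp c kf) (grp_keys_nodup c kf) ([] : List Int)]
  exact List.map_congr_left (fun v _ => grp_getD c kf v)

lemma cols_pairwise (c : List Int) (kf : Int × Int → Int) (v : Int) :
    (pvColsOf c kf v).Pairwise (· < ·) :=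
  List.Pairwise.map _ (fun _ _ h => h) ((enumerate_pairwise c).filter _)

lemma mem_cols (c : List Int) (kf : Int × Int → Int) (v : Int) (i : Int) :
    i ∈ pvColsOf c kf v ↔
      0 ≤ i ∧ i < (c.length : Int) ∧ kf (i, PySem.List.pyGetD c i 0) = v := by
  unfold pvColsOf
  simp only [List.mem_map, List.mem_filter]
  constructor
  · rintro ⟨⟨a, r⟩, ⟨he, hk⟩, rfl⟩
    obtain ⟨h0, hn, hr⟩ := (mem_enumerate c a r).1 he
    refine ⟨h0, hn, ?_⟩
    rw [← hr]
    exact beq_iff_eq.1 hk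
  · rintro ⟨h0, hn, hk⟩
    exact ⟨(i, PySem.List.pyGetD c i 0), ⟨(mem_enumerate c i _).2 ⟨h0, hn, rfl⟩,
      beq_iff_eq.2 hk⟩, rfl⟩

lemma lists_pairwise (c : List Int) (lst : List Int) (h : lst ∈ pvLists c) :
    lst.Pairwise (· < ·) := by
  unfold pvLists at h
  simp only [List.mem_append, grp_values, List.mem_map] at h
  rcases h with (⟨v, _, rfl⟩ | ⟨v, _, rfl⟩) | ⟨v, _, rfl⟩ <;> exact cols_pairwise c _ v

-- every list of pvLists is some pvColsOf with its key value in the dict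
lemma lists_char (c : List Int) (lst : List Int) (h : lst ∈ pvLists c) :
    ∃ kf, (kf = pvKF1 ∨ kf = pvKF2 ∨ kf = pvKF3) ∧ ∃ v, lst = pvColsOf c kf v := by
  unfold pvLists at h
  simp only [List.mem_append, grp_values, List.mem_map] at h
  rcases h with (⟨v, _, rfl⟩ | ⟨v, _, rfl⟩) | ⟨v, _, rfl⟩
  · exact ⟨pvKF1, Or.inl rfl, v, rfl⟩
  · exact ⟨pvKF2, Or.inr (Or.inl rfl), v, rfl⟩
  · exact ⟨pvKF3, Or.inr (Or.inr rfl), v, rfl⟩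

-- ----- the partner-filling loop -----

lemma fold_enum_go (full : List Int) (lst : List Int) (s : Int) (h0 : 0 ≤ s)
    (hdrop : full.drop s.toNat = lst) (p : PySem.Dict Int (List Int)) :
    (PySem.List.enumerate lst s).foldl
      (fun p e => p.modify e.2 ([] : List Int)
        (fun l => l ++ PySem.List.slice full (some (e.1 + 1)))) p
      = pwGo lst p := by
  induction lst generalizing s p with
  | nil => rfl
  | cons x t ih =>
    show (PySem.List.enumerate (x :: t) s).foldl _ p = pwGo t (p.modify x _ (fun l => l ++ t))
    have h1 : PySem.List.enumerate (x :: t) s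
        = (s, x) :: PySem.List.enumerate t (s + 1) := rfl
    rw [h1, List.foldl_cons]
    have hsl : PySem.List.slice full (some (s + 1)) = t := by
      rw [PySem.List.slice_from full (by omega : (0:Int) ≤ s + 1)]
      have : (s + 1).toNat = s.toNat + 1 := by omega
      rw [this, ← List.drop_drop, hdrop]
      rfl
    rw [show (fun l => l ++ PySem.List.slice full (some ((s, x).1 + 1)))
        = (fun l => l ++ t) from by rw [show ((s, x).1 + 1) = s + 1 from rfl, hsl]]
    refine ih (s + 1) (by omega) ?_ _
    have : (s + 1).toNat = s.toNat + 1 := by omega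
    rw [this, ← List.drop_drop, hdrop]
    rfl

lemma pwGo_getD (lst : List Int) (p : PySem.Dict Int (List Int)) (i : Int)
    (h : lst.Pairwise (· < ·)) :
    (pwGo lst p).getD i ([] : List Int)
      = p.getD i [] ++ (if i ∈ lst then lst.filter (fun j => decide (i < j)) else []) := by
  induction lst generalizing p with
  | nil => simp [pwGo]
  | cons x t ih =>
    obtain ⟨hxt, ht⟩ := List.pairwise_cons.1 h
    rw [pwGo, ih _ ht, PySem.Dict.getD_modify]
    by_cases hix : i = x
    · subst hix
      have hnt : i ∉ t := fun hmem => absurd (hxt i hmem) (lt_irrefl i)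
      rw [if_pos rfl, if_neg hnt, if_pos (List.mem_cons_self ..), List.filter_cons]
      have : ¬ (decide (i < i) = true) := by simp
      rw [if_neg this, List.append_nil,
        List.filter_eq_self.2 (fun j hj => by simpa using hxt j hj)]
    · rw [if_neg hix]
      by_cases hit : i ∈ t
      · rw [if_pos hit, if_pos (List.mem_cons_of_mem _ hit), List.filter_cons]
        have : ¬ (decide (i < x) = true) := by
          simpa using le_of_lt (hxt i hit)
        rw [if_neg this]
      · rw [if_neg hit, if_neg (by simp [hix, hit])]

lemma partners_getD_aux (L : List (List Int)) (p : PySem.Dict Int (List Int)) (i : Int)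
    (hall : ∀ lst ∈ L, lst.Pairwise (· < ·)) :
    (L.foldl (fun p lst => pwGo lst p) p).getD i ([] : List Int)
      = p.getD i []
        ++ L.flatMap (fun lst => if i ∈ lst then lst.filter (fun j => decide (i < j)) else []) := by
  induction L generalizing p with
  | nil => simp
  | cons lst t ih =>
    rw [List.foldl_cons, List.flatMap_cons,
      ih _ (fun l hl => hall l (List.mem_cons_of_mem _ hl)),
      pwGo_getD lst p i (hall lst (List.mem_cons_self ..)), List.append_assoc]

lemma partners_getD (c : List Int) (i : Int) :
    (pvPartners c).getD i ([] : List Int)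
      = (pvLists c).flatMap
          (fun lst => if i ∈ lst then lst.filter (fun j => decide (i < j)) else []) := by
  unfold pvPartners
  rw [partners_getD_aux _ _ _ (fun lst hl => lists_pairwise c lst hl),
    PySem.Dict.getD_empty, List.nil_append]

-- ----- membership and nodup of a column's partner list -----

lemma kf_cases_rel (c : List Int) (i j : Int) (kf : Int × Int → Int)
    (hkf : kf = pvKF1 ∨ kf = pvKF2 ∨ kf = pvKF3)
    (h : kf (i, PySem.List.pyGetD c i 0) = kf (j, PySem.List.pyGetD c j 0)) :
    pvRel c i j := by
  rcases hkf with rfl | rfl | rfl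
  · exact Or.inl h
  · exact Or.inr (Or.inl h)
  · exact Or.inr (Or.inr h)

lemma mem_partners (c : List Int) (i j : Int) :
    j ∈ (pvPartners c).getD i ([] : List Int) ↔
      0 ≤ i ∧ i < j ∧ j < (c.length : Int) ∧ pvRel c i j := by
  rw [partners_getD]
  simp only [List.mem_flatMap]
  constructor
  · rintro ⟨lst, hlst, hj⟩
    by_cases hmi : i ∈ lst
    swap
    · rw [if_neg hmi] at hj
      exact absurd hj (by simp)
    rw [if_pos hmi] at hj
    obtain ⟨hjl, hlt⟩ := List.mem_filter.1 hj
    obtain ⟨kf, hkf, v, rfl⟩ := lists_char c lst hlst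
    obtain ⟨hi0, hin, hiv⟩ := (mem_cols c kf v i).1 hmi
    obtain ⟨hj0, hjn, hjv⟩ := (mem_cols c kf v j).1 hjl
    exact ⟨hi0, by simpa using hlt, hjn, kf_cases_rel c i j kf hkf (hiv.trans hjv.symm)⟩
  · rintro ⟨h0, hlt, hn, hrel⟩
    have pick : ∃ kf, (kf = pvKF1 ∨ kf = pvKF2 ∨ kf = pvKF3) ∧
        kf (i, PySem.List.pyGetD c i 0) = kf (j, PySem.List.pyGetD c j 0) := by
      rcases hrel with h | h | h
      · exact ⟨pvKF1, Or.inl rfl, h⟩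
      · exact ⟨pvKF2, Or.inr (Or.inl rfl), h⟩
      · exact ⟨pvKF3, Or.inr (Or.inr rfl), h⟩
    obtain ⟨kf, hkf, hvv⟩ := pick
    refine ⟨pvColsOf c kf (kf (i, PySem.List.pyGetD c i 0)), ?_, ?_⟩
    · unfold pvLists
      have hin : kf (i, PySem.List.pyGetD c i 0) ∈ PySem.Set.ofList ((PySem.List.enumerate c).map kf) := by
        rw [PySem.Set.mem_ofList]
        exact List.mem_map.2 ⟨(i, PySem.List.pyGetD c i 0),
          (mem_enumerate c i _).2 ⟨h0, by omega, rfl⟩, rfl⟩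
      have : pvColsOf c kf (kf (i, PySem.List.pyGetD c i 0)) ∈ (pvGrp c kf).values := by
        rw [grp_values]
        exact List.mem_map.2 ⟨_, hin, rfl⟩
      rcases hkf with rfl | rfl | rfl
      · exact List.mem_append.2 (Or.inl (List.mem_append.2 (Or.inl this)))
      · exact List.mem_append.2 (Or.inl (List.mem_append.2 (Or.inr this)))
      · exact List.mem_append.2 (Or.inr this)
    · rw [if_pos ((mem_cols c kf _ i).2 ⟨h0, by omega, rfl⟩)]
      exact List.mem_filter.2 ⟨(mem_cols c kf _ j).2 ⟨by omega, hn, hvv.symm⟩, by simpa using hlt⟩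

lemma piece_spec (i : Int) (lst : List Int) (j : Int)
    (hj : j ∈ (if i ∈ lst then lst.filter (fun j => decide (i < j)) else [])) :
    i ∈ lst ∧ j ∈ lst ∧ i < j := by
  by_cases hi : i ∈ lst
  · rw [if_pos hi] at hj
    obtain ⟨h1, h2⟩ := List.mem_filter.1 hj
    exact ⟨hi, h1, by simpa using h2⟩
  · rw [if_neg hi] at hj
    exact absurd hj (by simp)

lemma key_of (c : List Int) (kf : Int × Int → Int) (v x : Int) (hx : x ∈ pvColsOf c kf v) :
    kf (x, PySem.List.pyGetD c x 0) = v := ((mem_cols c kf v x).1 hx).2.2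

lemma nodup_partners (c : List Int) (i : Int) :
    ((pvPartners c).getD i ([] : List Int)).Nodup := by
  rw [partners_getD]
  rw [List.nodup_flatMap]
  have hsame : ∀ kf (v v' : Int), v ≠ v' →
      List.Disjoint
        (if i ∈ pvColsOf c kf v then (pvColsOf c kf v).filter (fun j => decide (i < j)) else [])
        (if i ∈ pvColsOf c kf v' then (pvColsOf c kf v').filter (fun j => decide (i < j)) else []) := by
    intro kf v v' hne j hj hj'
    obtain ⟨hi, -, -⟩ := piece_spec i _ j hj
    obtain ⟨hi', -, -⟩ := piece_spec i _ j hj'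
    exact hne ((key_of c kf v i hi).symm.trans (key_of c kf v' i hi'))
  have hcross : ∀ (kf kf' : Int × Int → Int),
      (∀ a b ri rj : Int, a < b → kf (a, ri) = kf (b, rj) → kf' (a, ri) = kf' (b, rj) → False) →
      ∀ (v v' : Int),
      List.Disjoint
        (if i ∈ pvColsOf c kf v then (pvColsOf c kf v).filter (fun j => decide (i < j)) else [])
        (if i ∈ pvColsOf c kf' v' then (pvColsOf c kf' v').filter (fun j => decide (i < j)) else []) := by
    intro kf kf' hbad v v' j hj hj'
    obtain ⟨hi, hjm, hlt⟩ := piece_spec i _ j hj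
    obtain ⟨hi', hjm', -⟩ := piece_spec i _ j hj'
    exact hbad i j _ _ hlt
      ((key_of c kf v i hi).trans (key_of c kf v j hjm).symm)
      ((key_of c kf' v' i hi').trans (key_of c kf' v' j hjm').symm)
  have hwithin : ∀ kf, ((pvGrp c kf).values).Pairwise
      (Function.onFun List.Disjoint
        (fun lst => if i ∈ lst then lst.filter (fun j => decide (i < j)) else [])) := by
    intro kf
    rw [grp_values]
    refine List.Pairwise.map _ ?_ ((PySem.Set.nodup_ofList _).imp (fun h => h))
    intro v v' hvv
    exact hsame kf v v' hvv
  have h12 : ∀ a b ri rj : Int, a < b → pvKF1 (a, ri) = pvKF1 (b, rj) →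
      pvKF2 (a, ri) = pvKF2 (b, rj) → False := by
    intro a b ri rj hlt h1 h2
    simp only [pvKF1, pvKF2] at h1 h2
    omega
  have h13 : ∀ a b ri rj : Int, a < b → pvKF1 (a, ri) = pvKF1 (b, rj) →
      pvKF3 (a, ri) = pvKF3 (b, rj) → False := by
    intro a b ri rj hlt h1 h2
    simp only [pvKF1, pvKF3] at h1 h2
    omega
  have h23 : ∀ a b ri rj : Int, a < b → pvKF2 (a, ri) = pvKF2 (b, rj) →
      pvKF3 (a, ri) = pvKF3 (b, rj) → False := by
    intro a b ri rj hlt h1 h2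
    simp only [pvKF2, pvKF3] at h1 h2
    omega
  refine ⟨?_, ?_⟩
  · intro lst hlst
    by_cases hi : i ∈ lst
    · rw [if_pos hi]
      exact ((lists_pairwise c lst hlst).filter _).imp
        (fun hab e => by subst e; exact lt_irrefl _ hab)
    · rw [if_neg hi]; exact List.Pairwise.nil
  · unfold pvLists
    rw [List.pairwise_append]
    refine ⟨?_, hwithin pvKF3, ?_⟩
    · rw [List.pairwise_append]
      refine ⟨hwithin pvKF1, hwithin pvKF2, ?_⟩
      intro lst h1 lst' h2
      obtain ⟨v, -, rfl⟩ := List.mem_map.1 (by rw [grp_values] at h1; exact h1)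
      obtain ⟨v', -, rfl⟩ := List.mem_map.1 (by rw [grp_values] at h2; exact h2)
      exact hcross pvKF1 pvKF2 h12 v v'
    · intro lst h12m lst' h3
      obtain ⟨v', -, rfl⟩ := List.mem_map.1 (by rw [grp_values] at h3; exact h3)
      rcases List.mem_append.1 h12m with h1 | h2
      · obtain ⟨v, -, rfl⟩ := List.mem_map.1 (by rw [grp_values] at h1; exact h1)
        exact hcross pvKF1 pvKF3 h13 v v'
      · obtain ⟨v, -, rfl⟩ := List.mem_map.1 (by rw [grp_values] at h2; exact h2)
        exact hcross pvKF2 pvKF3 h23 v v'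

lemma partners_sorted (c : List Int) (i : Int) (h0 : 0 ≤ i) :
    PySem.List.sorted ((pvPartners c).getD i ([] : List Int)) (fun x => x)
      = (PySem.List.pyRange (i + 1) (c.length : Int)).filter (fun j => pvClashB c i j) := by
  apply PySem.List.sorted_eq_of_perm_of_pairwise_lt
  · refine (List.perm_ext_iff_of_nodup ?_ (nodup_partners c i)).2 ?_
    · exact ((pyRange_pairwise _ _).filter _).imp
        (fun hab e => by subst e; exact lt_irrefl _ hab)
    · intro j
      rw [List.mem_filter, PySem.List.mem_pyRange_one, mem_partners]
      constructor
      · rintro ⟨⟨h1, h2⟩, hcl⟩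
        exact ⟨h0, by omega, h2, (clash_iff c i j (by omega)).1 hcl⟩
      · rintro ⟨-, hlt, hn, hrel⟩
        exact ⟨⟨by omega, hn⟩, (clash_iff c i j hlt).2 hrel⟩
  · exact (pyRange_pairwise _ _).filter _

lemma pvAlt_eq (c : List Int) :
    find_clashing_pairs_alt c
      = (PySem.List.pyRange 0 (c.length : Int)).flatMap (fun i =>
          (PySem.List.sorted ((pvPartners c).getD i ([] : List Int)) (fun x => x)).map
            (fun j => (PySem.List.pyGetD (pvCellsList c) i (0, 0),
                       PySem.List.pyGetD (pvCellsList c) j (0, 0)))) := by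
  unfold find_clashing_pairs_alt
  rw [PySem.List.foldl_prod_mk
    (f := fun (d : PySem.Dict Int (List Int)) (e : Int × Int) =>
      d.modify e.2 ([] : List Int) (fun l => l ++ [e.1]))
    (g := fun (g2 : PySem.Dict Int (List Int) × PySem.Dict Int (List Int)) (e : Int × Int) =>
      (g2.1.modify (e.2 - e.1) ([] : List Int) (fun l => l ++ [e.1]),
       g2.2.modify (e.2 + e.1) ([] : List Int) (fun l => l ++ [e.1])))]
  rw [PySem.List.foldl_prod_mk
    (f := fun (d : PySem.Dict Int (List Int)) (e : Int × Int) =>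
      d.modify (e.2 - e.1) ([] : List Int) (fun l => l ++ [e.1]))
    (g := fun (d : PySem.Dict Int (List Int)) (e : Int × Int) =>
      d.modify (e.2 + e.1) ([] : List Int) (fun l => l ++ [e.1]))]
  have hgrp1 : List.foldl (fun (d : PySem.Dict Int (List Int)) (e : Int × Int) =>
      d.modify e.2 ([] : List Int) (fun l => l ++ [e.1])) PySem.Dict.empty
      (PySem.List.enumerate c) = pvGrp c pvKF1 := rfl
  have hgrp2 : List.foldl (fun (d : PySem.Dict Int (List Int)) (e : Int × Int) =>
      d.modify (e.2 - e.1) ([] : List Int) (fun l => l ++ [e.1])) PySem.Dict.empty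
      (PySem.List.enumerate c) = pvGrp c pvKF2 := rfl
  have hgrp3 : List.foldl (fun (d : PySem.Dict Int (List Int)) (e : Int × Int) =>
      d.modify (e.2 + e.1) ([] : List Int) (fun l => l ++ [e.1])) PySem.Dict.empty
      (PySem.List.enumerate c) = pvGrp c pvKF3 := rfl
  rw [hgrp1, hgrp2, hgrp3]
  -- the per-list partner fold is pwGo
  have hlst : ∀ (p : PySem.Dict Int (List Int)) (lst : List Int),
      (PySem.List.enumerate lst).foldl
        (fun p e => p.modify e.2 ([] : List Int)
          (fun l => l ++ PySem.List.slice lst (some (e.1 + 1)))) p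
        = pwGo lst p :=
    fun p lst => fold_enum_go lst lst 0 le_rfl (by simp) p
  have hmid : ∀ (g : PySem.Dict Int (List Int)) (p : PySem.Dict Int (List Int)),
      g.values.foldl (fun p lst =>
        (PySem.List.enumerate lst).foldl
          (fun p e => p.modify e.2 ([] : List Int)
            (fun l => l ++ PySem.List.slice lst (some (e.1 + 1)))) p) p
        = g.values.foldl (fun p lst => pwGo lst p) p := by
    intro g p
    exact PySem.List.foldl_congr_mem _ _ _ _ (fun p lst _ => hlst p lst)
  simp only [List.foldl_cons, List.foldl_nil, hmid]
  rw [show ∀ p0, ((pvGrp c pvKF3).values.foldl (fun p lst => pwGo lst p)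
        ((pvGrp c pvKF2).values.foldl (fun p lst => pwGo lst p)
          ((pvGrp c pvKF1).values.foldl (fun p lst => pwGo lst p) p0)))
      = (pvLists c).foldl (fun p lst => pwGo lst p) p0 from
    fun p0 => by rw [pvLists, List.foldl_append, List.foldl_append], ]
  refine Eq.trans (PySem.List.foldl_congr_mem _ _
    (fun out i => out ++ (PySem.List.sorted ((pvPartners c).getD i ([] : List Int))
        (fun x => x)).map
      (fun j => (PySem.List.pyGetD (pvCellsList c) i (0, 0),
                 PySem.List.pyGetD (pvCellsList c) j (0, 0)))) _
    (fun out i _ => by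
      show (match (pvPartners c).get? i with
        | none => out
        | some ps =>
          if ps.isEmpty then out
          else out ++ (PySem.List.sorted ps (fun x => x)).map
            (fun j => (PySem.List.pyGetD (pvCellsList c) i (0, 0),
                       PySem.List.pyGetD (pvCellsList c) j (0, 0)))) = _
      cases hg : (pvPartners c).get? i with
      | none =>
        simp only [PySem.Dict.getD_eq_get?_getD, hg, Option.getD_none]
        rw [show PySem.List.sorted ([] : List Int) (fun x => x) = [] from rfl,
          List.map_nil, List.append_nil]
      | some ps =>
        simp only [PySem.Dict.getD_eq_get?_getD, hg, Option.getD_some]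
        by_cases hemp : ps.isEmpty
        · rw [List.isEmpty_iff] at hemp
          subst hemp
          rw [if_pos (by rfl),
            show PySem.List.sorted ([] : List Int) (fun x => x) = [] from rfl,
            List.map_nil, List.append_nil]
        · rw [if_neg hemp])) ?_
  rw [PySem.List.foldl_append_eq_flatMap]
  simp

-- ===== VERDICT (by name: the statement is the Claim_ definition above) =====
theorem find_clashing_pairs_spec : Claim_equal_find_clashing_pairs := by
  intro c _
  show find_clashing_pairs c = find_clashing_pairs_alt c
  rw [pvAlt_eq, pvA_eq_canon]
  unfold pvCanon
  rw [List.flatMap_def, List.flatMap_def]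
  refine congrArg List.flatten (List.map_congr_left ?_)
  intro i hi
  rw [PySem.List.mem_pyRange_one] at hi
  rw [partners_sorted c i hi.1]
  refine List.map_congr_left ?_
  intro j hj
  obtain ⟨hjr, -⟩ := List.mem_filter.1 hj
  rw [PySem.List.mem_pyRange_one] at hjr
  rw [cellsList_get c i hi.1 (by omega), cellsList_get c j (by omega) (by omega)]
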